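-- pv_equiv track=rewrite | github.com/norchcode/ai-qa-agent | src/visual_testing.py | _extract_ui_elements_from_text
-- ===== SOURCE A (Python) =====
-- from typing import Dict, List, Any, Optional, Union, Tuple
--
-- def _extract_ui_elements_from_text(text: str) -> List[Dict[str, Any]]:
--     """
--     Extract UI elements from text output when JSON parsing fails.
--
--     Args:
--         text: The text output from the LLM.
--
--     Returns:
--         List of UI elements extracted from the text.
--     """
--     ui_elements = []
--     current_element = {}
--
--     for line in text.split('\n'):
--         line = line.strip()
--         if not line:
--             continue
--
--         if line.startswith('Element') or line.startswith('UI Element') or line.startswith('-'):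
--             if current_element and 'description' in current_element:
--                 ui_elements.append(current_element)
--             current_element = {'description': line}
--         elif 'type' in line.lower():
--             for element_type in ['button', 'link', 'input', 'dropdown', 'form', 'checkbox', 'radio', 'text', 'image']:
--                 if element_type in line.lower():
--                     current_element['type'] = element_type
--                     break
--         elif 'purpose' in line.lower() or 'function' in line.lower():
--             current_element['purpose'] = line
--
--     if current_element and 'description' in current_element:
--         ui_elements.append(current_element)
--
--     return ui_elements if ui_elements else [{"description": text}]
-- ===== SOURCE B (Python) =====
-- from typing import Dict, List, Any
--
-- _TYPE_KEYWORDS = ['button', 'link', 'input', 'dropdown', 'form', 'checkbox', 'radio', 'text', 'image']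
--
-- def _is_header(line: str) -> bool:
--     return line.startswith('Element') or line.startswith('UI Element') or line.startswith('-')
--
-- def _build_element(header: str, body: List[str]) -> Dict[str, Any]:
--     element = {'description': header}
--     for line in body:
--         low = line.lower()
--         if 'type' in low:
--             for keyword in _TYPE_KEYWORDS:
--                 if keyword in low:
--                     element['type'] = keyword
--                     break
--         elif 'purpose' in low or 'function' in low:
--             element['purpose'] = line
--     return element
--
-- def _extract_ui_elements_from_text(text: str) -> List[Dict[str, Any]]:
--     # Phase 1: stripped non-empty lines, partitioned into (header, body) groups;
--     # lines before the first header are dropped.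
--     lines = [s for s in (raw.strip() for raw in text.split('\n')) if s]
--     groups: List[tuple] = []
--     current = None
--     for line in lines:
--         if _is_header(line):
--             if current is not None:
--                 groups.append(current)
--             current = (line, [])
--         elif current is not None:
--             current[1].append(line)
--     if current is not None:
--         groups.append(current)
--     # Phase 2: one element per group.
--     elements = [_build_element(h, b) for h, b in groups]
--     return elements if elements else [{'description': text}]
-- ===== Notes on version B (the rewrite author's own statement) =====
-- stated objective: alternative
-- what changed: Replaced A's single stateful loop carrying a mutable current-element dict with a two-phase decomposition: first partition the stripped non-empty lines into header-led groups (lines before the first header are dropped), then build one element dict per group.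
import Mathlib
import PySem

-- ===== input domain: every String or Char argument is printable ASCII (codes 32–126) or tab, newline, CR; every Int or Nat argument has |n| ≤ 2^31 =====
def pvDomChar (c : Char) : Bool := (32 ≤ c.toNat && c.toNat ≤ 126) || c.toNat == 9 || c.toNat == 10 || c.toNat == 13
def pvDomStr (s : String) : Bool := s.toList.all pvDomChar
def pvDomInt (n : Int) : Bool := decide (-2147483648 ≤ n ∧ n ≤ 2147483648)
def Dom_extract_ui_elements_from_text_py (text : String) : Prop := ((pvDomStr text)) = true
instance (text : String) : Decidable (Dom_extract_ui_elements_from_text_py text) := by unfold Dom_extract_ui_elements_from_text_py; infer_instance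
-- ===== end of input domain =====

-- B re-decomposes A's single stateful loop into two phases (partition lines into header-led
-- groups, then build one element per group); same return value, objective: alternative decomposition.

-- ===== PORT A =====
-- A's inline keyword list
def pyTypeKeywordsA : List String :=
  ["button", "link", "input", "dropdown", "form", "checkbox", "radio", "text", "image"]

-- one iteration of A's for-loop; state = (ui_elements, current_element)
def pyStepA (st : List (PySem.Dict String String) × PySem.Dict String String) (raw : String) :
    List (PySem.Dict String String) × PySem.Dict String String :=
  let line := PySem.Str.strip raw
  if line = "" then st
  else if PySem.Str.startswith line "Element" || PySem.Str.startswith line "UI Element" ||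
          PySem.Str.startswith line "-" then
    let ui := if st.2.size ≠ 0 ∧ st.2.contains "description" = true then st.1 ++ [st.2] else st.1
    (ui, PySem.Dict.empty.insert "description" line)
  else if PySem.Str.isIn "type" (PySem.Str.lower line) then
    -- for element_type in [...]: if element_type in line.lower(): set; break
    match pyTypeKeywordsA.find? (fun t => PySem.Str.isIn t (PySem.Str.lower line)) with
    | some t => (st.1, st.2.insert "type" t)
    | none => st
  else if PySem.Str.isIn "purpose" (PySem.Str.lower line) ||
          PySem.Str.isIn "function" (PySem.Str.lower line) then
    (st.1, st.2.insert "purpose" line)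
  else st

def extract_ui_elements_from_text_py (text : String) : List (List (String × String)) :=
  let fin := ((PySem.Str.split? text "\n").getD []).foldl pyStepA ([], PySem.Dict.empty)
  let ui := if fin.2.size ≠ 0 ∧ fin.2.contains "description" = true then fin.1 ++ [fin.2] else fin.1
  if ui = [] then [[("description", text)]] else ui.map (·.items)

-- ===== PORT B =====
def pyTypeKeywordsB : List String :=
  ["button", "link", "input", "dropdown", "form", "checkbox", "radio", "text", "image"]

def pyIsHeader (line : String) : Bool :=
  PySem.Str.startswith line "Element" || PySem.Str.startswith line "UI Element" ||
    PySem.Str.startswith line "-"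

-- body of _build_element's loop
def pyCascade (el : PySem.Dict String String) (line : String) : PySem.Dict String String :=
  let low := PySem.Str.lower line
  if PySem.Str.isIn "type" low then
    match pyTypeKeywordsB.find? (fun t => PySem.Str.isIn t low) with
    | some t => el.insert "type" t
    | none => el
  else if PySem.Str.isIn "purpose" low || PySem.Str.isIn "function" low then
    el.insert "purpose" line
  else el

def pyBuildElement (header : String) (body : List String) : PySem.Dict String String :=
  body.foldl pyCascade (PySem.Dict.empty.insert "description" header)

-- grouping loop; state = (finished groups, current (header, body) or none)
def pyGroupStep (st : List (String × List String) × Option (String × List String)) (line : String) :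
    List (String × List String) × Option (String × List String) :=
  if pyIsHeader line then
    (st.1 ++ st.2.toList, some (line, []))
  else
    match st.2 with
    | none => st
    | some (h, b) => (st.1, some (h, b ++ [line]))

def extract_ui_elements_from_text_py_alt (text : String) : List (List (String × String)) :=
  let lines := (((PySem.Str.split? text "\n").getD []).map PySem.Str.strip).filter (· ≠ "")
  let fin := lines.foldl pyGroupStep ([], none)
  let groups := fin.1 ++ fin.2.toList
  let elements := groups.map (fun g => pyBuildElement g.1 g.2)
  if elements = [] then [[("description", text)]] else elements.map (·.items)

-- ===== PRECONDITION & SPEC =====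
def Spec_extract_ui_elements_from_text_py (text : String) (out : List (List (String × String))) : Prop := out = extract_ui_elements_from_text_py_alt text
instance (text : String) (out : List (List (String × String))) : Decidable (Spec_extract_ui_elements_from_text_py text out) := by unfold Spec_extract_ui_elements_from_text_py; infer_instance

-- ===== CLAIM (what is proved, stated in full; the proofs are below) =====
def Claim_equal_extract_ui_elements_from_text_py : Prop := ∀ (text : String), Dom_extract_ui_elements_from_text_py text → Spec_extract_ui_elements_from_text_py text (extract_ui_elements_from_text_py text)

-- ===== LEMMAS AND PROOFS =====

-- A's loop body on an already-stripped non-empty line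
def pyStepA' (st : List (PySem.Dict String String) × PySem.Dict String String) (line : String) :
    List (PySem.Dict String String) × PySem.Dict String String :=
  if pyIsHeader line then
    let ui := if st.2.size ≠ 0 ∧ st.2.contains "description" = true then st.1 ++ [st.2] else st.1
    (ui, PySem.Dict.empty.insert "description" line)
  else (st.1, pyCascade st.2 line)

theorem pyStepA_eq (st : List (PySem.Dict String String) × PySem.Dict String String)
    (raw : String) :
    pyStepA st raw =
      if PySem.Str.strip raw = "" then st else pyStepA' st (PySem.Str.strip raw) := by
  simp only [pyStepA, pyStepA', pyIsHeader, pyCascade,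
    show pyTypeKeywordsA = pyTypeKeywordsB from rfl]
  split
  · rfl
  · split
    · rfl
    · split
      · cases List.find? (fun t => PySem.Str.isIn t (PySem.Str.lower (PySem.Str.strip raw)))
            pyTypeKeywordsB <;> rfl
      · split <;> rfl

theorem foldA_strip (raws : List String)
    (st : List (PySem.Dict String String) × PySem.Dict String String) :
    raws.foldl pyStepA st =
      ((raws.map PySem.Str.strip).filter (· ≠ "")).foldl pyStepA' st := by
  induction raws generalizing st with
  | nil => rfl
  | cons r rs ih =>
    simp only [List.foldl_cons, List.map_cons, List.filter_cons, pyStepA_eq]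
    by_cases h : PySem.Str.strip r = "" <;> simp [h, ih]

-- the cascade never touches the 'description' key
theorem contains_cascade_eq (d : PySem.Dict String String) (l : String) :
    (pyCascade d l).contains "description" = d.contains "description" := by
  simp only [pyCascade]
  split
  · cases List.find? (fun t => PySem.Str.isIn t (PySem.Str.lower l)) pyTypeKeywordsB with
    | none => rfl
    | some t => simp [PySem.Dict.contains_insert]
  · split
    · simp [PySem.Dict.contains_insert]
    · rfl

theorem build_append (h : String) (b : List String) (l : String) :
    pyBuildElement h (b ++ [l]) = pyCascade (pyBuildElement h b) l := by
  simp [pyBuildElement]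

-- 'description' is a key of every built element, and never a key before the first header
theorem contains_build (h : String) (b : List String) :
    (pyBuildElement h b).contains "description" = true := by
  induction b using List.reverseRecOn with
  | nil => simp [pyBuildElement, PySem.Dict.contains_insert_self]
  | append_singleton b l ih => rw [build_append, contains_cascade_eq]; exact ih

theorem size_build_ne (h : String) (b : List String) : (pyBuildElement h b).size ≠ 0 := by
  have hc := contains_build h b
  intro hs
  have hi : (pyBuildElement h b).items = [] := by
    cases hi : (pyBuildElement h b).items with
    | nil => rfl
    | cons p ps => simp [PySem.Dict.size, hi] at hs
  simp [PySem.Dict.contains, hi] at hc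

-- finished list of A after processing lines ls from state st
def resultA (ls : List String) (st : List (PySem.Dict String String) × PySem.Dict String String) :
    List (PySem.Dict String String) :=
  let fin := ls.foldl pyStepA' st
  if fin.2.size ≠ 0 ∧ fin.2.contains "description" = true then fin.1 ++ [fin.2] else fin.1

-- groups produced by B's grouping loop from state st
def groupsB (ls : List String) (st : List (String × List String) × Option (String × List String)) :
    List (String × List String) :=
  let fin := ls.foldl pyGroupStep st
  fin.1 ++ fin.2.toList

theorem resultA_cons (l : String) (ls : List String)
    (st : List (PySem.Dict String String) × PySem.Dict String String) :
    resultA (l :: ls) st = resultA ls (pyStepA' st l) := by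
  simp [resultA]

theorem groupsB_cons (l : String) (ls : List String)
    (st : List (String × List String) × Option (String × List String)) :
    groupsB (l :: ls) st = groupsB ls (pyGroupStep st l) := by
  simp [groupsB]

theorem groupsB_acc (ls : List String) (gacc : List (String × List String))
    (cur : Option (String × List String)) :
    groupsB ls (gacc, cur) = gacc ++ groupsB ls ([], cur) := by
  induction ls generalizing gacc cur with
  | nil => simp [groupsB]
  | cons l ls ih =>
    rw [groupsB_cons, groupsB_cons]
    by_cases hl : pyIsHeader l = true
    · have h1 : pyGroupStep (gacc, cur) l = (gacc ++ cur.toList, some (l, [])) := by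
        simp [pyGroupStep, hl]
      have h2 : pyGroupStep ([], cur) l = (cur.toList, some (l, [])) := by
        simp [pyGroupStep, hl]
      rw [h1, h2, ih, ih cur.toList]
      simp
    · cases cur with
      | none =>
        have h1 : pyGroupStep (gacc, none) l = (gacc, none) := by simp [pyGroupStep, hl]
        have h2 : pyGroupStep (([] : List (String × List String)), none) l = ([], none) := by
          simp [pyGroupStep, hl]
        rw [h1, h2, ih]
      | some g =>
        have h1 : pyGroupStep (gacc, some g) l = (gacc, some (g.1, g.2 ++ [l])) := by
          cases g; simp [pyGroupStep, hl]
        have h2 : pyGroupStep (([] : List (String × List String)), some g) l =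
            ([], some (g.1, g.2 ++ [l])) := by
          cases g; simp [pyGroupStep, hl]
        rw [h1, h2, ih]

theorem mid_group (ls : List String) (acc : List (PySem.Dict String String))
    (h : String) (b : List String) :
    resultA ls (acc, pyBuildElement h b) =
      acc ++ (groupsB ls ([], some (h, b))).map (fun g => pyBuildElement g.1 g.2) := by
  induction ls generalizing acc h b with
  | nil => simp [resultA, groupsB, contains_build, size_build_ne]
  | cons l ls ih =>
    rw [resultA_cons, groupsB_cons]
    by_cases hl : pyIsHeader l = true
    · have hA : pyStepA' (acc, pyBuildElement h b) l =
          (acc ++ [pyBuildElement h b], pyBuildElement l []) := by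
        simp only [pyStepA', hl, if_true]
        rw [if_pos ⟨size_build_ne h b, contains_build h b⟩]
        rfl
      have hB : pyGroupStep ([], some (h, b)) l = ([(h, b)], some (l, [])) := by
        simp [pyGroupStep, hl]
      rw [hA, hB, ih, groupsB_acc ls [(h, b)]]
      simp
    · have hA : pyStepA' (acc, pyBuildElement h b) l = (acc, pyBuildElement h (b ++ [l])) := by
        simp [pyStepA', hl, build_append]
      have hB : pyGroupStep ([], some (h, b)) l = ([], some (h, b ++ [l])) := by
        simp [pyGroupStep, hl]
      rw [hA, hB, ih]

theorem pre_header (ls : List String) (acc : List (PySem.Dict String String))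
    (d : PySem.Dict String String) (hd : d.contains "description" = false) :
    resultA ls (acc, d) =
      acc ++ (groupsB ls ([], none)).map (fun g => pyBuildElement g.1 g.2) := by
  induction ls generalizing acc d with
  | nil => simp [resultA, groupsB, hd]
  | cons l ls ih =>
    rw [resultA_cons, groupsB_cons]
    by_cases hl : pyIsHeader l = true
    · have hA : pyStepA' (acc, d) l = (acc, pyBuildElement l []) := by
        simp [pyStepA', hl, hd, pyBuildElement]
      have hB : pyGroupStep ([], none) l = ([], some (l, [])) := by
        simp [pyGroupStep, hl]
      rw [hA, hB]
      exact mid_group ls acc l []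
    · have hA : pyStepA' (acc, d) l = (acc, pyCascade d l) := by
        simp [pyStepA', hl]
      have hB : pyGroupStep (([] : List (String × List String)), none) l = ([], none) := by
        simp [pyGroupStep, hl]
      rw [hA, hB, ih _ _ (by rw [contains_cascade_eq]; exact hd)]

theorem result_eq_groups (ls : List String) :
    (if (ls.foldl pyStepA' ([], PySem.Dict.empty)).2.size ≠ 0 ∧
        (ls.foldl pyStepA' ([], PySem.Dict.empty)).2.contains "description" = true then
      (ls.foldl pyStepA' ([], PySem.Dict.empty)).1 ++ [(ls.foldl pyStepA' ([], PySem.Dict.empty)).2]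
    else (ls.foldl pyStepA' ([], PySem.Dict.empty)).1) =
      ((ls.foldl pyGroupStep ([], none)).1 ++
        (ls.foldl pyGroupStep ([], none)).2.toList).map (fun g => pyBuildElement g.1 g.2) := by
  have key := pre_header ls [] PySem.Dict.empty (by simp [pysem])
  simpa [resultA, groupsB] using key

-- ===== VERDICT (by name: the statement is the Claim_ definition above) =====
theorem extract_ui_elements_from_text_py_spec : Claim_equal_extract_ui_elements_from_text_py := by
  intro text _
  show extract_ui_elements_from_text_py text = extract_ui_elements_from_text_py_alt text
  simp only [extract_ui_elements_from_text_py, extract_ui_elements_from_text_py_alt]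
  rw [foldA_strip, result_eq_groups]
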